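-- pv_equiv track=rewrite | github.com/IAjimi/AdventOfCode | 2021/AOC9.py | bfs
-- ===== SOURCE A (Python) =====
-- def get_neighbors(grid: dict, pos: tuple):
--     x, y = pos
--     neighbors = [(x - 1, y), (x + 1, y), (x, y - 1), (x, y + 1)]
--     neighbors = [n for n in neighbors if n in grid]
--     return neighbors
--
-- def bfs(grid: dict, point: tuple):
--     queue = [point]
--     visited = set()
--     steps = 0
--
--     while queue:
--         current_loc = queue.pop()
--
--         if current_loc not in visited:
--             visited.add(current_loc)
--             steps += 1
--
--             neighbors = get_neighbors(grid, current_loc)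
--             neighbors = [n for n in neighbors if grid[n] < 9]
--             queue.extend(neighbors)
--
--     return steps
-- ===== SOURCE B (Python) =====
-- def bfs(grid, point):
--     comp = {point}
--     changed = True
--     while changed:
--         changed = False
--         for k in grid:
--             if k not in comp and grid[k] < 9:
--                 x, y = k
--                 if any(n in comp for n in ((x - 1, y), (x + 1, y), (x, y - 1), (x, y + 1))):
--                     comp.add(k)
--                     changed = True
--     return len(comp)
-- ===== Notes on version B (the rewrite author's own statement) =====
-- stated objective: alternative
-- what changed: A's stack-based flood fill (pop, mark-and-count on pop, push neighbors) is replaced by a transitive-closure fixpoint: repeatedly sweep all grid cells, adding any cell with value < 9 adjacent to the current component, until a sweep adds nothing; the answer is len(comp).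
import Mathlib
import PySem

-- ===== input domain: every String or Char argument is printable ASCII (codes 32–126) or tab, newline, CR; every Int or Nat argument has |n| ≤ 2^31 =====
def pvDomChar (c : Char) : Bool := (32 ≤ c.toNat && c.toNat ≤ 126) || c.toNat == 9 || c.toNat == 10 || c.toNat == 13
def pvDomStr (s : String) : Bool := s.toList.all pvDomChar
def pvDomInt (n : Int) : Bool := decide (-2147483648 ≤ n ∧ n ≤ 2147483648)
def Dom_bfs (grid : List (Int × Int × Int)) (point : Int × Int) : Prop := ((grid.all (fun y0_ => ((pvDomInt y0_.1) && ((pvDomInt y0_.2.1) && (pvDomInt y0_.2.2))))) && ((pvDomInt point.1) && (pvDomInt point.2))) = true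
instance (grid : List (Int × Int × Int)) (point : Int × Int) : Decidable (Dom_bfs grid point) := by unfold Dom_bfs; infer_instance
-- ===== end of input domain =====

-- B replaces A's stack-based flood fill by a transitive-closure fixpoint: it repeatedly sweeps
-- all grid cells, adding any cell with value < 9 adjacent to the current component, until a
-- sweep adds nothing; same return value, alternative algorithm (not claimed faster).

-- ===== PORT A =====
-- shared helper: first-match lookup in the (x, y, value) association list (Python's grid[n] / n in grid)
def gget? : List (Int × Int × Int) → (Int × Int) → Option Int
  | [], _ => none
  | e :: rest, k => if e.1 = k.1 ∧ e.2.1 = k.2 then some e.2.2 else gget? rest k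

def pvNeighbors (pos : Int × Int) : List (Int × Int) :=
  [(pos.1 - 1, pos.2), (pos.1 + 1, pos.2), (pos.1, pos.2 - 1), (pos.1, pos.2 + 1)]

def get_neighbors (grid : List (Int × Int × Int)) (pos : Int × Int) : List (Int × Int) :=
  (pvNeighbors pos).filter (fun n => (gget? grid n).isSome)

-- termination bookkeeping (not part of the algorithm)
def pvKeys (grid : List (Int × Int × Int)) : List (Int × Int) := grid.map (fun e => (e.1, e.2.1))
def pvCand (grid : List (Int × Int × Int)) (point : Int × Int) : List (Int × Int) := point :: pvKeys grid
def pvRemain (grid : List (Int × Int × Int)) (point : Int × Int) (visited : List (Int × Int)) : Nat :=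
  ((pvCand grid point).filter (fun x => !decide (x ∈ visited))).length
def pvRemainB (grid : List (Int × Int × Int)) (visited : List (Int × Int)) : Nat :=
  ((pvKeys grid).filter (fun x => !decide (x ∈ visited))).length

theorem pv_filter_len_le {α : Type} (l : List α) (p q : α → Bool)
    (hpq : ∀ x, q x = true → p x = true) : (l.filter q).length ≤ (l.filter p).length := by
  induction l with
  | nil => simp
  | cons a t ih =>
    cases hqa : q a with
    | true =>
      have hpa := hpq a hqa
      simp [hqa, hpa, List.length_cons]
      omega
    | false =>
      cases hpa : p a <;> simp [hqa, hpa, List.length_cons] <;> omega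

theorem pv_filter_len_lt {α : Type} (l : List α) (p q : α → Bool)
    (hpq : ∀ x, q x = true → p x = true) (c : α) (hc : c ∈ l) (hp : p c = true)
    (hq : q c = false) : (l.filter q).length < (l.filter p).length := by
  induction l with
  | nil => simp at hc
  | cons a t ih =>
    rcases List.mem_cons.1 hc with rfl | hct
    · have h1 := pv_filter_len_le t p q hpq
      simp [hp, hq, List.length_cons]
      omega
    · cases hqa : q a with
      | true =>
        have hpa := hpq a hqa
        have h2 := ih hct
        simp [hqa, hpa, List.length_cons]
        omega
      | false =>
        have h2 := ih hct
        cases hpa : p a <;> simp [hqa, hpa, List.length_cons] <;> omega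

theorem gget?_isSome_mem (grid : List (Int × Int × Int)) (k : Int × Int)
    (h : (gget? grid k).isSome = true) : k ∈ pvKeys grid := by
  induction grid with
  | nil => simp [gget?] at h
  | cons e rest ih =>
    by_cases he : e.1 = k.1 ∧ e.2.1 = k.2
    · have : (e.1, e.2.1) = k := by cases k; simp_all
      simp [pvKeys, this]
    · simp [gget?, he] at h
      simp [pvKeys] at ih ⊢
      right; exact ih h

theorem pvRemain_add_lt (grid : List (Int × Int × Int)) (point : Int × Int)
    (visited : List (Int × Int)) (c : Int × Int) (hc : c ∈ pvCand grid point)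
    (hv : c ∉ visited) :
    pvRemain grid point (PySem.Set.add visited c) < pvRemain grid point visited := by
  unfold pvRemain
  refine pv_filter_len_lt _ _ _ ?_ c hc ?_ ?_
  · intro x hx
    simp only [Bool.not_eq_true', decide_eq_false_iff_not, PySem.Set.mem_add] at hx ⊢
    exact fun hmem => hx (Or.inl hmem)
  · simp [hv]
  · simp [PySem.Set.mem_add]

def bfsLoop (grid : List (Int × Int × Int)) (point : Int × Int)
    (queue : List (Int × Int)) (visited : PySem.Set (Int × Int)) (steps : Int)
    (hq : ∀ x ∈ queue, x ∈ pvCand grid point) : Int :=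
  if h : queue = [] then steps
  else
    if hv : queue.getLast h ∈ visited then
      bfsLoop grid point queue.dropLast visited steps
        (fun x hx => hq x (List.mem_of_mem_dropLast hx))
    else
      bfsLoop grid point
        (queue.dropLast ++ ((get_neighbors grid (queue.getLast h)).filter
          (fun n => match gget? grid n with | some v => decide (v < 9) | none => false)))
        (PySem.Set.add visited (queue.getLast h)) (steps + 1)
        (by
          intro x hx
          rcases List.mem_append.1 hx with h1 | h2
          · exact hq x (List.mem_of_mem_dropLast h1)
          · have h3 := (List.mem_filter.1 h2).1
            have h4 := (List.mem_filter.1 h3).2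
            exact List.mem_cons.2 (Or.inr (gget?_isSome_mem grid x h4)))
termination_by 4 * pvRemain grid point visited + queue.length
decreasing_by
  · have : queue.dropLast.length < queue.length := by
      have : queue.length ≠ 0 := by simpa using congrArg List.length |>.mt (by simpa using h)
      simp [List.length_dropLast]; omega
    omega
  · have hlt := pvRemain_add_lt grid point visited (queue.getLast h)
      (hq _ (List.getLast_mem h)) hv
    have hns : ((get_neighbors grid (queue.getLast h)).filter
        (fun n => match gget? grid n with | some v => decide (v < 9) | none => false)).length ≤ 4 := by
      have h1 := List.length_filter_le
        (fun n => match gget? grid n with | some v => decide (v < 9) | none => false)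
        (get_neighbors grid (queue.getLast h))
      have h2 := List.length_filter_le (fun n => (gget? grid n).isSome) (pvNeighbors (queue.getLast h))
      simp [get_neighbors, pvNeighbors] at h1 h2 ⊢
      omega
    have hdl : queue.dropLast.length + 1 = queue.length := by
      have : queue.length ≠ 0 := by simpa using congrArg List.length |>.mt (by simpa using h)
      simp [List.length_dropLast]; omega
    simp only [List.length_append]
    omega

def bfs (grid : List (Int × Int × Int)) (point : Int × Int) : Int :=
  bfsLoop grid point [point] PySem.Set.empty 0
    (by intro x hx; simp at hx; simp [pvCand, hx])

-- ===== PORT B =====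
-- the body of B's inner 'for k in grid' test: k unvisited, value < 9, some neighbor already in comp
def condBool (grid : List (Int × Int × Int)) (comp : PySem.Set (Int × Int)) (k : Int × Int) : Bool :=
  !decide (k ∈ comp) &&
    (match gget? grid k with | some v => decide (v < 9) | none => false) &&
    (pvNeighbors k).any (fun n => decide (n ∈ comp))

def passStep (grid : List (Int × Int × Int)) (st : PySem.Set (Int × Int) × Bool)
    (k : Int × Int) : PySem.Set (Int × Int) × Bool :=
  if condBool grid st.1 k then (PySem.Set.add st.1 k, true) else st

theorem passStep_mono (grid : List (Int × Int × Int)) (st : PySem.Set (Int × Int) × Bool)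
    (k x : Int × Int) (h : x ∈ st.1) : x ∈ (passStep grid st k).1 := by
  unfold passStep
  split
  · simp [PySem.Set.mem_add, h]
  · exact h

theorem passFold_mono (grid : List (Int × Int × Int)) (ks : List (Int × Int)) :
    ∀ (st : PySem.Set (Int × Int) × Bool) (x : Int × Int), x ∈ st.1 →
      x ∈ (ks.foldl (passStep grid) st).1 := by
  induction ks with
  | nil => intro st x h; simpa using h
  | cons k t ih =>
    intro st x h
    exact ih (passStep grid st k) x (passStep_mono grid st k x h)

theorem passFold_changed (grid : List (Int × Int × Int)) (ks : List (Int × Int)) :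
    ∀ (st : PySem.Set (Int × Int) × Bool), (ks.foldl (passStep grid) st).2 = true →
      st.2 = true ∨ ∃ k, k ∈ (ks.foldl (passStep grid) st).1 ∧ k ∉ st.1 ∧ k ∈ pvKeys grid := by
  induction ks with
  | nil => intro st h; exact Or.inl h
  | cons k t ih =>
    intro st h
    simp only [List.foldl_cons] at h ⊢
    rcases ih (passStep grid st k) h with h1 | ⟨k', hk1, hk2, hk3⟩
    · by_cases hc : condBool grid st.1 k = true
      · right
        refine ⟨k, ?_, ?_, ?_⟩
        · exact passFold_mono grid t _ k (by simp [passStep, hc, PySem.Set.mem_add])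
        · unfold condBool at hc
          simp only [Bool.and_eq_true, Bool.not_eq_true', decide_eq_false_iff_not] at hc
          exact hc.1.1
        · unfold condBool at hc
          simp only [Bool.and_eq_true, Bool.not_eq_true', decide_eq_false_iff_not] at hc
          have h2 := hc.1.2
          apply gget?_isSome_mem grid k
          cases hg : gget? grid k with
          | none => rw [hg] at h2; simp at h2
          | some v => simp
      · left
        have : passStep grid st k = st := by simp [passStep, hc]
        rwa [this] at h1
    · right
      refine ⟨k', hk1, fun hm => hk2 (passStep_mono grid st k k' hm), hk3⟩

def closeLoop (grid : List (Int × Int × Int)) (comp : PySem.Set (Int × Int)) : Int :=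
  if ((pvKeys grid).foldl (passStep grid) (comp, false)).2 = true then
    closeLoop grid ((pvKeys grid).foldl (passStep grid) (comp, false)).1
  else
    (comp.length : Int)
termination_by pvRemainB grid comp
decreasing_by
  rename_i h
  rcases passFold_changed grid (pvKeys grid) (comp, false) h with h1 | ⟨k, hk1, hk2, hk3⟩
  · simp at h1
  · unfold pvRemainB
    refine pv_filter_len_lt _ _ _ ?_ k hk3 ?_ ?_
    · intro x hx
      simp only [Bool.not_eq_true', decide_eq_false_iff_not] at hx ⊢
      exact fun hm => hx (passFold_mono grid (pvKeys grid) (comp, false) x hm)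
    · simp [hk2]
    · simp [hk1]

def bfs_alt (grid : List (Int × Int × Int)) (point : Int × Int) : Int :=
  closeLoop grid (PySem.Set.ofList [point])

-- ===== PRECONDITION & SPEC =====
def Spec_bfs (grid : List (Int × Int × Int)) (point : Int × Int) (out : Int) : Prop := out = bfs_alt grid point
instance (grid : List (Int × Int × Int)) (point : Int × Int) (out : Int) : Decidable (Spec_bfs grid point out) := by unfold Spec_bfs; infer_instance

-- ===== CLAIM (what is proved, stated in full; the proofs are below) =====
def Claim_equal_bfs : Prop := ∀ (grid : List (Int × Int × Int)) (point : Int × Int), Dom_bfs grid point → Spec_bfs grid point (bfs grid point)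

-- ===== LEMMAS AND PROOFS =====
def pvEdge (grid : List (Int × Int × Int)) (n : Int × Int) : Bool :=
  match gget? grid n with | some v => decide (v < 9) | none => false

def pvAdj (grid : List (Int × Int × Int)) (c : Int × Int) : List (Int × Int) :=
  (pvNeighbors c).filter (pvEdge grid)

inductive pvRch (grid : List (Int × Int × Int)) (vis : Set (Int × Int)) (q : Int × Int) :
    (Int × Int) → Prop
  | base (h : q ∉ vis) : pvRch grid vis q q
  | step (c n : Int × Int) (h : pvRch grid vis q c) (hn : n ∈ pvNeighbors c)
      (he : pvEdge grid n = true) (hv : n ∉ vis) : pvRch grid vis q n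

def pvR (grid : List (Int × Int × Int)) (vis : Set (Int × Int)) (Q : List (Int × Int)) :
    Set (Int × Int) := {x | ∃ q ∈ Q, pvRch grid vis q x}

theorem pvRch_src (grid : List (Int × Int × Int)) {vis : Set (Int × Int)} {q x : Int × Int}
    (h : pvRch grid vis q x) : q ∉ vis := by
  induction h with
  | base h => exact h
  | step _ _ _ _ _ _ ih => exact ih

theorem pvRch_tgt (grid : List (Int × Int × Int)) {vis : Set (Int × Int)} {q x : Int × Int}
    (h : pvRch grid vis q x) : x ∉ vis := by
  cases h with
  | base h => exact h
  | step _ _ _ _ _ hv => exact hv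

theorem pvRch_mono (grid : List (Int × Int × Int)) {vis vis' : Set (Int × Int)}
    {q x : Int × Int} (hsub : vis ⊆ vis') (h : pvRch grid vis' q x) : pvRch grid vis q x := by
  induction h with
  | base h => exact pvRch.base (fun hx => h (hsub hx))
  | step c n _ hn he hv ih => exact pvRch.step c n ih hn he (fun hx => hv (hsub hx))

theorem pvRch_trans (grid : List (Int × Int × Int)) {vis : Set (Int × Int)}
    {a b c : Int × Int} (h1 : pvRch grid vis a b) (h2 : pvRch grid vis b c) :
    pvRch grid vis a c := by
  induction h2 with
  | base _ => exact h1
  | step m n _ hn he hv ih => exact pvRch.step m n ih hn he hv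

theorem pvRch_tgt_mem (grid : List (Int × Int × Int)) {vis : Set (Int × Int)} {q x : Int × Int}
    (h : pvRch grid vis q x) : x = q ∨ x ∈ pvKeys grid := by
  induction h with
  | base _ => exact Or.inl rfl
  | step _ n _ _ he _ _ =>
    right
    unfold pvEdge at he
    cases hg : gget? grid n with
    | none => simp [hg] at he
    | some v => exact gget?_isSome_mem grid n (by simp [hg])

theorem pvR_finite (grid : List (Int × Int × Int)) (vis : Set (Int × Int))
    (Q : List (Int × Int)) : (pvR grid vis Q).Finite := by
  apply Set.Finite.subset (List.finite_toSet (Q ++ pvKeys grid))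
  rintro x ⟨q, hq, hrch⟩
  rcases pvRch_tgt_mem grid hrch with rfl | hk
  · simp [hq]
  · simp [hk]

theorem pvR_nil (grid : List (Int × Int × Int)) (vis : Set (Int × Int)) :
    pvR grid vis [] = ∅ := by
  ext x; simp [pvR]

theorem pvR_pop_visited (grid : List (Int × Int × Int)) (vis : Set (Int × Int))
    (Q : List (Int × Int)) (c : Int × Int) (hc : c ∈ vis) :
    pvR grid vis (Q ++ [c]) = pvR grid vis Q := by
  ext x
  constructor
  · rintro ⟨q, hq, hrch⟩
    rcases List.mem_append.1 hq with h1 | h2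
    · exact ⟨q, h1, hrch⟩
    · simp at h2; subst h2; exact absurd hc (pvRch_src grid hrch)
  · rintro ⟨q, hq, hrch⟩; exact ⟨q, List.mem_append.2 (Or.inl hq), hrch⟩

-- THE key lemma for A: expanding an unvisited popped node
theorem pvR_expand (grid : List (Int × Int × Int)) (vis : Set (Int × Int))
    (Q : List (Int × Int)) (c : Int × Int) (hc : c ∉ vis) :
    pvR grid vis (Q ++ [c]) = insert c (pvR grid (insert c vis) (Q ++ pvAdj grid c)) := by
  ext x
  constructor
  · rintro ⟨q, hq, hrch⟩
    have key : ∀ y, pvRch grid vis q y →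
        y = c ∨ y ∈ pvR grid (insert c vis) (Q ++ pvAdj grid c) := by
      intro y hy
      induction hy with
      | base h =>
        rcases List.mem_append.1 hq with h1 | h2
        · by_cases hqc : q = c
          · exact Or.inl hqc
          · exact Or.inr ⟨q, List.mem_append.2 (Or.inl h1),
              pvRch.base (by simp [Set.mem_insert_iff, hqc, h])⟩
        · simp at h2; exact Or.inl h2
      | step m n h hn he hv ih =>
        by_cases hnc : n = c
        · exact Or.inl hnc
        · have hnv : n ∉ insert c vis := by simp [Set.mem_insert_iff, hnc, hv]
          rcases ih with rfl | ⟨q', hq', hrch'⟩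
          · exact Or.inr ⟨n, List.mem_append.2 (Or.inr (List.mem_filter.2 ⟨hn, he⟩)),
              pvRch.base hnv⟩
          · exact Or.inr ⟨q', hq', pvRch.step m n hrch' hn he hnv⟩
    rcases key x hrch with rfl | hmem
    · exact Set.mem_insert _ _
    · exact Set.mem_insert_of_mem _ hmem
  · intro hx
    rcases Set.mem_insert_iff.1 hx with rfl | ⟨q, hq, hrch⟩
    · exact ⟨x, by simp, pvRch.base hc⟩
    · have hmono := pvRch_mono grid (Set.subset_insert c vis) hrch
      rcases List.mem_append.1 hq with h1 | h2
      · exact ⟨q, List.mem_append.2 (Or.inl h1), hmono⟩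
      · have hqa := List.mem_filter.1 h2
        have hqv : q ∉ vis := fun hh => pvRch_src grid hrch (Set.mem_insert_of_mem c hh)
        refine ⟨c, by simp, pvRch_trans grid ?_ hmono⟩
        exact pvRch.step c q (pvRch.base hc) hqa.1 hqa.2 hqv

-- A's double filter is pvAdj
theorem ns_eq_pvAdj (grid : List (Int × Int × Int)) (c : Int × Int) :
    (get_neighbors grid c).filter
      (fun n => match gget? grid n with | some v => decide (v < 9) | none => false) = pvAdj grid c := by
  unfold get_neighbors pvAdj
  rw [List.filter_filter]
  apply List.filter_congr
  intro x _
  unfold pvEdge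
  cases gget? grid x <;> simp

-- the visited set after Set.add, as a Set
theorem set_add_as_insert (visited : PySem.Set (Int × Int)) (c : Int × Int) :
    {x | x ∈ PySem.Set.add visited c} = insert c {x | x ∈ visited} := by
  ext x; simp [PySem.Set.mem_add]; tauto

-- loop invariant for A
theorem bfsLoop_inv (grid : List (Int × Int × Int)) (point : Int × Int) :
    ∀ (queue : List (Int × Int)) (visited : PySem.Set (Int × Int)) (steps : Int)
      (hq : ∀ x ∈ queue, x ∈ pvCand grid point),
      bfsLoop grid point queue visited steps hq =
        steps + ((pvR grid {x | x ∈ visited} queue).ncard : Int) := by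
  intro queue visited steps hq
  fun_induction bfsLoop grid point queue visited steps hq with
  | case1 visited steps hq =>
    simp [pvR_nil]
  | case2 queue visited steps hq h hv ih =>
    rw [ih]
    have hsplit : queue.dropLast ++ [queue.getLast h] = queue := List.dropLast_concat_getLast h
    conv_rhs => rw [← hsplit]
    rw [pvR_pop_visited grid _ _ _ (by simpa using hv)]
  | case3 queue visited steps hq h hv ih =>
    rw [ih]
    have hsplit : queue.dropLast ++ [queue.getLast h] = queue := List.dropLast_concat_getLast h
    conv_rhs => rw [← hsplit]
    rw [pvR_expand grid _ _ _ (by simpa using hv), ns_eq_pvAdj, set_add_as_insert]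
    have hnot : queue.getLast h ∉
        pvR grid (insert (queue.getLast h) {x | x ∈ visited}) (queue.dropLast ++ pvAdj grid (queue.getLast h)) := by
      rintro ⟨q, hq', hrch⟩
      exact pvRch_tgt grid hrch (Set.mem_insert _ _)
    rw [Set.ncard_insert_of_notMem hnot (pvR_finite grid _ _)]
    push_cast
    ring

-- neighborhood is symmetric
theorem pvNeighbors_symm (a b : Int × Int) : a ∈ pvNeighbors b ↔ b ∈ pvNeighbors a := by
  rcases a with ⟨x, y⟩; rcases b with ⟨u, v⟩
  simp only [pvNeighbors, List.mem_cons, List.not_mem_nil, or_false, Prod.mk.injEq]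
  constructor <;> (intro h; rcases h with ⟨h1, h2⟩ | ⟨h1, h2⟩ | ⟨h1, h2⟩ | ⟨h1, h2⟩) <;>
    [skip; skip; skip; skip; skip; skip; skip; skip] <;> omega

-- the condition condBool, unpacked
theorem condBool_iff (grid : List (Int × Int × Int)) (comp : PySem.Set (Int × Int))
    (k : Int × Int) :
    condBool grid comp k = true ↔
      k ∉ comp ∧ pvEdge grid k = true ∧ ∃ n ∈ pvNeighbors k, n ∈ comp := by
  unfold condBool pvEdge
  simp only [Bool.and_eq_true, Bool.not_eq_true', decide_eq_false_iff_not, List.any_eq_true,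
    decide_eq_true_eq]
  tauto

-- added cells stay Nodup
theorem passFold_nodup (grid : List (Int × Int × Int)) (ks : List (Int × Int)) :
    ∀ (st : PySem.Set (Int × Int) × Bool), st.1.Nodup →
      (ks.foldl (passStep grid) st).1.Nodup := by
  induction ks with
  | nil => intro st h; simpa using h
  | cons k t ih =>
    intro st h
    apply ih
    unfold passStep
    split
    · rename_i hc
      have hk : k ∉ st.1 := by
        have := ((condBool_iff grid st.1 k).1 hc).1
        exact this
      rw [PySem.Set.add_of_not_mem hk]
      refine List.Nodup.append h (List.nodup_singleton k) ?_
      intro a ha hb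
      simp at hb; subst hb; exact hk ha
    · exact h

-- added cells are reachable
theorem passFold_sound (grid : List (Int × Int × Int)) (point : Int × Int)
    (ks : List (Int × Int)) :
    ∀ (st : PySem.Set (Int × Int) × Bool),
      (∀ x ∈ st.1, pvRch grid ∅ point x) →
      ∀ x ∈ (ks.foldl (passStep grid) st).1, pvRch grid ∅ point x := by
  induction ks with
  | nil => intro st h x hx; exact h x (by simpa using hx)
  | cons k t ih =>
    intro st h
    apply ih
    intro x hx
    unfold passStep at hx
    split at hx
    · rename_i hc
      rcases (condBool_iff grid st.1 k).1 hc with ⟨-, he, n, hn, hnc⟩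
      rcases (PySem.Set.mem_add st.1 k x).1 hx with hx1 | rfl
      · exact h x hx1
      · exact pvRch.step n x (h n hnc) ((pvNeighbors_symm n x).1 hn) he (by simp)
    · exact h x hx

-- changed stays true through a pass
theorem passFold_sticky (grid : List (Int × Int × Int)) (ks : List (Int × Int)) :
    ∀ (st : PySem.Set (Int × Int) × Bool), st.2 = true →
      (ks.foldl (passStep grid) st).2 = true := by
  induction ks with
  | nil => intro st h; simpa using h
  | cons k t ih =>
    intro st h
    apply ih
    unfold passStep
    split
    · simp
    · exact h

-- if a whole pass reports no change, the component is a fixpoint of the rule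
theorem passFold_fix (grid : List (Int × Int × Int)) (ks : List (Int × Int)) :
    ∀ (st : PySem.Set (Int × Int) × Bool),
      (ks.foldl (passStep grid) st).2 = false →
      ks.foldl (passStep grid) st = st ∧ ∀ k ∈ ks, condBool grid st.1 k = false := by
  induction ks with
  | nil => intro st h; exact ⟨rfl, by simp⟩
  | cons k t ih =>
    intro st h
    simp only [List.foldl_cons] at h ⊢
    by_cases hc : condBool grid st.1 k = true
    · exfalso
      have : (passStep grid st k).2 = true := by simp [passStep, hc]
      have := passFold_sticky grid t (passStep grid st k) this
      rw [this] at h; exact absurd h (by simp)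
    · have hstep : passStep grid st k = st := by simp [passStep, hc]
      rw [hstep] at h ⊢
      rcases ih st h with ⟨h1, h2⟩
      refine ⟨h1, fun k' hk' => ?_⟩
      rcases List.mem_cons.1 hk' with rfl | hk'
      · simpa using hc
      · exact h2 k' hk'

-- loop invariant for B
theorem closeLoop_inv (grid : List (Int × Int × Int)) (point : Int × Int) :
    ∀ (comp : PySem.Set (Int × Int)), comp.Nodup → point ∈ comp →
      (∀ x ∈ comp, pvRch grid ∅ point x) →
      closeLoop grid comp = ((pvR grid ∅ [point]).ncard : Int) := by
  intro comp
  fun_induction closeLoop grid comp with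
  | case1 comp hch ih =>
    intro hnd hpt hsound
    exact ih (passFold_nodup grid (pvKeys grid) (comp, false) hnd)
      (passFold_mono grid (pvKeys grid) (comp, false) point hpt)
      (passFold_sound grid point (pvKeys grid) (comp, false) hsound)
  | case2 comp hch =>
    intro hnd hpt hsound
    simp only [Bool.not_eq_true] at hch
    rcases passFold_fix grid (pvKeys grid) (comp, false) hch with ⟨-, hfix⟩
    have hset : {x | x ∈ comp} = pvR grid ∅ [point] := by
      ext x
      constructor
      · intro hx
        exact ⟨point, by simp, hsound x hx⟩
      · rintro ⟨q, hq, hrch⟩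
        simp only [List.mem_singleton] at hq; subst hq
        induction hrch with
        | base _ => exact hpt
        | step c n hc hn he _ ihc =>
          by_cases hm : n ∈ comp
          · exact hm
          · exfalso
            have hk : n ∈ pvKeys grid := by
              unfold pvEdge at he
              cases hg : gget? grid n with
              | none => rw [hg] at he; simp at he
              | some v => exact gget?_isSome_mem grid n (by simp [hg])
            have : condBool grid comp n = true := by
              rw [condBool_iff]
              exact ⟨hm, he, c, (pvNeighbors_symm c n).2 hn, ihc⟩
            rw [hfix n hk] at this
            exact absurd this (by simp)
    rw [← hset]
    have : ({x | x ∈ comp} : Set (Int × Int)).ncard = comp.length := by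
      rw [← List.coe_toFinset, Set.ncard_coe_finset, List.toFinset_card_of_nodup hnd]
    rw [this]

-- ===== VERDICT (by name: the statement is the Claim_ definition above) =====
theorem bfs_spec : Claim_equal_bfs := by
  intro grid point _
  unfold Spec_bfs bfs bfs_alt
  rw [bfsLoop_inv]
  have hinit : PySem.Set.ofList [point] = [point] := rfl
  rw [hinit, closeLoop_inv grid point [point] (by simp) (by simp)
    (by intro x hx; simp at hx; subst hx; exact pvRch.base (by simp))]
  have hempty : {x : Int × Int | x ∈ (PySem.Set.empty : PySem.Set (Int × Int))} = (∅ : Set (Int × Int)) := by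
    ext x; simp [PySem.Set.empty]
  rw [hempty]
  ring
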